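-- pv_equiv track=rewrite | github.com/JHF101/Computer_Vision_Pong | Python/moments.py | moments
-- ===== SOURCE A (Python) =====
-- def moments(dataPoints):
--     """
--     Takes in a contour returned by suzuki85 algorithm in order calculate the moment of shape
--
--     Parameters
--     ----------
--     dataPoints: list[list[int]]
--         Data points multiple x and y values
--
--     Returns
--     -------
--     m00: int
--         Area for grasclae image
--     m01: int
--         Centroid x * area
--     m10: int
--         Centroid y * area
--     """
--     xVals = []
--     yVals = []
--     for i in range(len(dataPoints)):
--         xVals.append(dataPoints[i][0])
--         yVals.append(dataPoints[i][1])
--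
--     m00 = 0
--     m01 = 0
--     m10 = 0
--     for y in yVals:
--         for x in xVals:
--             # m00 - sum of I
--             m00 += 1 #I[y][x] -> Taking the value as equal to 1 because no image is needed
--
--             # sum(sum(y*I(x,y)))
--             m01 += y #*I[y][x]
--
--             # sum(sum(y*I(x,y)))
--             m10 += x #*I[y][x]
--
--
--     return m00, m01, m10
-- ===== SOURCE B (Python) =====
-- def moments(dataPoints):
--     n = len(dataPoints)
--     sx = 0
--     sy = 0
--     for p in dataPoints:
--         sx += p[0]
--         sy += p[1]
--     return n * n, n * sy, n * sx
-- ===== Notes on version B (the rewrite author's own statement) =====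
-- stated objective: faster
-- what changed: Replaced the quadratic double loop over all (y,x) pairs by a single pass computing n, sum(x), sum(y) and the closed forms n*n, n*sum(y), n*sum(x).
import Mathlib
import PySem

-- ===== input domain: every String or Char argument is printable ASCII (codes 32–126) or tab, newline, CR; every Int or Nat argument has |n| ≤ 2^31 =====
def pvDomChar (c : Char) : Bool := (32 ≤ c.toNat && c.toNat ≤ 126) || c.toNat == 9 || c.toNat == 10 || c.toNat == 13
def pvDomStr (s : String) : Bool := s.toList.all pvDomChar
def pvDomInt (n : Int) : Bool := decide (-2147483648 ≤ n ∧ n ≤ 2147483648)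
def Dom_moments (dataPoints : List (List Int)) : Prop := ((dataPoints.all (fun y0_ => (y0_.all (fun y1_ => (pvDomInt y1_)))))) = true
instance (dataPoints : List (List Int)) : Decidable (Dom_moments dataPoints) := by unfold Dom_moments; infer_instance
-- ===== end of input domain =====

-- B replaces A's quadratic double loop by one pass computing n, Σx, Σy and the closed forms n*n, n*Σy, n*Σx (asymptotically faster).

-- ===== PORT A =====
-- first loop: for i in range(len(dataPoints)): xVals.append(dataPoints[i][0]); yVals.append(dataPoints[i][1])
-- (indexing is pyGetD with a dummy default; Pre_moments guarantees the indices are in range, matching Python)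
def moments (dataPoints : List (List Int)) : List Int :=
  let xy : List Int × List Int :=
    (PySem.List.pyRange 0 dataPoints.length 1).foldl
      (fun (acc : List Int × List Int) i =>
        (acc.1 ++ [PySem.List.pyGetD (PySem.List.pyGetD dataPoints i []) 0 0],
         acc.2 ++ [PySem.List.pyGetD (PySem.List.pyGetD dataPoints i []) 1 0])) ([], [])
  -- second loop: for y in yVals: for x in xVals: m00 += 1; m01 += y; m10 += x
  let t : Int × Int × Int :=
    xy.2.foldl
      (fun (t : Int × Int × Int) y =>
        xy.1.foldl (fun (t : Int × Int × Int) x => (t.1 + 1, t.2.1 + y, t.2.2 + x)) t)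
      (0, 0, 0)
  [t.1, t.2.1, t.2.2]

-- ===== PORT B =====
def moments_alt (dataPoints : List (List Int)) : List Int :=
  let n : Int := dataPoints.length
  let s : Int × Int :=
    dataPoints.foldl
      (fun (s : Int × Int) p =>
        (s.1 + PySem.List.pyGetD p 0 0, s.2 + PySem.List.pyGetD p 1 0)) (0, 0)
  [n * n, n * s.2, n * s.1]

-- ===== PRECONDITION & SPEC =====
-- A indexes each row at [0] and [1]; it raises IndexError exactly when some row has fewer than 2 entries.
def Pre_moments (dataPoints : List (List Int)) : Prop :=
  ∀ r ∈ dataPoints, 2 ≤ r.length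
instance (dataPoints : List (List Int)) : Decidable (Pre_moments dataPoints) := by
  unfold Pre_moments; infer_instance
def pvWitness_moments : List (List Int) := [[1, 2], [3, 4], [5, 6]]

def Spec_moments (dataPoints : List (List Int)) (out : List Int) : Prop := out = moments_alt dataPoints
instance (dataPoints : List (List Int)) (out : List Int) : Decidable (Spec_moments dataPoints out) := by unfold Spec_moments; infer_instance

-- ===== CLAIM (what is proved, stated in full; the proofs are below) =====
def Claim_equal_moments : Prop := ∀ (dataPoints : List (List Int)), Dom_moments dataPoints → Pre_moments dataPoints → Spec_moments dataPoints (moments dataPoints)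

-- ===== LEMMAS AND PROOFS =====

-- A's first loop appends to both lists at once: a pair-of-appends fold is a pair of maps.
theorem pairfold {α β : Type} (l : List α) (fx fy : α → β) (as bs : List β) :
    l.foldl (fun (acc : List β × List β) i => (acc.1 ++ [fx i], acc.2 ++ [fy i])) (as, bs)
      = (as ++ l.map fx, bs ++ l.map fy) := by
  induction l generalizing as bs with
  | nil => simp
  | cons h t ih => simp [List.foldl_cons, ih]

-- A's inner loop over xVals adds (1, y, x) per element.
theorem innerfold (xs : List Int) (y : Int) (t : Int × Int × Int) :
    xs.foldl (fun (t : Int × Int × Int) x => (t.1 + 1, t.2.1 + y, t.2.2 + x)) t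
      = (t.1 + xs.length, t.2.1 + xs.length * y, t.2.2 + xs.sum) := by
  induction xs generalizing t with
  | nil => simp
  | cons h tl ih =>
    rw [List.foldl_cons, ih]
    simp only [List.length_cons, List.sum_cons, Prod.mk.injEq]
    refine ⟨?_, ?_, ?_⟩ <;> push_cast <;> ring

-- A's outer loop over yVals.
theorem outerfold (ys xs : List Int) (t : Int × Int × Int) :
    ys.foldl
      (fun (t : Int × Int × Int) y =>
        xs.foldl (fun (t : Int × Int × Int) x => (t.1 + 1, t.2.1 + y, t.2.2 + x)) t) t
      = (t.1 + ys.length * xs.length, t.2.1 + xs.length * ys.sum, t.2.2 + ys.length * xs.sum) := by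
  induction ys generalizing t with
  | nil => simp
  | cons h tl ih =>
    rw [List.foldl_cons, innerfold, ih]
    simp only [List.length_cons, List.sum_cons, Prod.mk.injEq]
    refine ⟨?_, ?_, ?_⟩ <;> push_cast <;> ring

-- B's single pass computes the two column sums.
theorem bfold (l : List (List Int)) (s : Int × Int) :
    l.foldl
      (fun (s : Int × Int) p =>
        (s.1 + PySem.List.pyGetD p 0 0, s.2 + PySem.List.pyGetD p 1 0)) s
      = (s.1 + (l.map (fun p => PySem.List.pyGetD p 0 0)).sum,
         s.2 + (l.map (fun p => PySem.List.pyGetD p 1 0)).sum) := by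
  induction l generalizing s with
  | nil => simp
  | cons h tl ih => simp [List.foldl_cons, ih]; constructor <;> ring

-- ===== VERDICT (by name: the statement is the Claim_ definition above) =====
theorem moments_spec : Claim_equal_moments := by
  intro dps _ _
  unfold Spec_moments moments moments_alt
  simp only [pairfold, outerfold, bfold, List.nil_append]
  have h : ∀ (k d : Int),
      List.map (fun i => PySem.List.pyGetD (PySem.List.pyGetD dps i []) k d)
        (PySem.List.pyRange 0 (dps.length : Int) 1)
      = dps.map (fun p => PySem.List.pyGetD p k d) := by
    intro k d
    have := PySem.List.map_pyGetD_pyRange_zero dps []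
    calc List.map (fun i => PySem.List.pyGetD (PySem.List.pyGetD dps i []) k d)
          (PySem.List.pyRange 0 (dps.length : Int) 1)
        = List.map (fun p => PySem.List.pyGetD p k d)
            (List.map (fun i => PySem.List.pyGetD dps i [])
              (PySem.List.pyRange 0 (dps.length : Int) 1)) := by
          rw [List.map_map]; rfl
      _ = dps.map (fun p => PySem.List.pyGetD p k d) := by
          rw [show (PySem.List.pyRange 0 (dps.length : Int) 1)
                = PySem.List.pyRange 0 (PySem.List.len dps) from rfl, this]
  rw [h 0 0, h 1 0]
  simp [List.length_map]
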